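-- pv_equiv track=rewrite | github.com/Leegaeun1/coding-test | Programmers/Lv2/더 맵게.py | solution
-- ===== SOURCE A (Python) =====
-- import heapq
--
-- def solution(scoville, K):
--     cnt=0
--     heapq.heapify(scoville)
--     while(scoville[0]<K and len(scoville)>1):
--         f=heapq.heappop(scoville)
--         q=heapq.heappop(scoville)
--         heapq.heappush(scoville,f+q*2)
--         cnt+=1
--     if min(scoville)<K:
--         return -1
--     return cnt
-- ===== SOURCE B (Python) =====
-- def solution(scoville, K):
--     # Two-queue Huffman-style merge: sort once; merged values go into an
--     # append-only list read through a cursor, so each step takes the smaller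
--     # of the two queue fronts in O(1) -- no heap and no mid-list insertion.
--     xs = sorted(scoville)
--     merged = []
--     i = 0  # cursor into xs
--     j = 0  # cursor into merged
--     cnt = 0
--     while True:
--         if i < len(xs) and (len(merged) <= j or xs[i] <= merged[j]):
--             m = xs[i]
--         else:
--             m = merged[j]
--         remaining = (len(xs) - i) + (len(merged) - j)
--         if not (m < K and remaining > 1):
--             break
--         if i < len(xs) and (len(merged) <= j or xs[i] <= merged[j]):
--             f = xs[i]
--             i += 1
--         else:
--             f = merged[j]
--             j += 1
--         if i < len(xs) and (len(merged) <= j or xs[i] <= merged[j]):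
--             q = xs[i]
--             i += 1
--         else:
--             q = merged[j]
--             j += 1
--         merged.append(f + q * 2)
--         cnt += 1
--     return -1 if m < K else cnt
-- ===== Notes on version B (the rewrite author's own statement) =====
-- stated objective: faster
-- what changed: Replaces the heap entirely by the two-queue Huffman-merge technique: sort once, then keep merged values in an append-only FIFO list read through a cursor; each step pops the smaller of the two queue fronts in O(1) instead of O(log n) heap sifts (correct because each newly merged value is at least every value still waiting in the merged queue).
import Mathlib
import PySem

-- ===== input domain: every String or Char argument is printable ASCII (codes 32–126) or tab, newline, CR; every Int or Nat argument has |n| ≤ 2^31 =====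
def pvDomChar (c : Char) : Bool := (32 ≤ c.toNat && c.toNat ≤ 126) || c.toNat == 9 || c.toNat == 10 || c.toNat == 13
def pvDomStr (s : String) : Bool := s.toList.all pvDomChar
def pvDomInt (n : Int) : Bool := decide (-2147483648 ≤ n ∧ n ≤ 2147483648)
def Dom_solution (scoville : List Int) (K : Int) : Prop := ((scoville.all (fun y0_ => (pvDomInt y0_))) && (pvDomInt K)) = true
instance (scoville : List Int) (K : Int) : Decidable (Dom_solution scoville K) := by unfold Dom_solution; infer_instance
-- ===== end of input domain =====

-- B replaces A's heap by the two-queue Huffman-merge technique: sort once, keep merged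
-- values in an append-only list read through a cursor, and pop the smaller of the two
-- queue fronts. A mutates its argument in place (heapify); the equivalence proved here
-- is about the return value only.

-- ===== PORT A =====
-- Transliteration of CPython's heapq internals (heapq is not in PySem, so it is ported
-- by hand, step for step from Lib/heapq.py; list indexing is via getD, exact on the
-- in-range indices these routines use; each while-loop carries a fuel bound that is
-- provably never exhausted, a totality guard only).

-- _siftdown's while-loop: shift parents down while newitem < parent; returns array and final pos
def pvSdLoop (fuel : Nat) (h : List Int) (start pos : Nat) (newitem : Int) : List Int × Nat :=
  match fuel with
  | 0 => (h, pos)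
  | fuel + 1 =>
    if start < pos then
      let parentpos := (pos - 1) / 2
      let parent := h.getD parentpos 0
      if newitem < parent then
        pvSdLoop fuel (h.set pos parent) start parentpos newitem
      else (h, pos)
    else (h, pos)

-- heapq._siftdown(heap, startpos, pos)  (pos strictly decreases, so pos steps suffice)
def pvSiftdown (h : List Int) (start pos : Nat) : List Int :=
  let newitem := h.getD pos 0
  let r := pvSdLoop pos h start pos newitem
  r.1.set r.2 newitem

-- _siftup's while-loop: move the smaller child up until reaching a leaf
def pvSuLoop (fuel : Nat) (h : List Int) (pos : Nat) : List Int × Nat :=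
  match fuel with
  | 0 => (h, pos)
  | fuel + 1 =>
    let endpos := h.length
    let childpos := 2 * pos + 1
    if childpos < endpos then
      let c := if childpos + 1 < endpos ∧ ¬ (h.getD childpos 0 < h.getD (childpos + 1) 0)
               then childpos + 1 else childpos
      pvSuLoop fuel (h.set pos (h.getD c 0)) c
    else (h, pos)

-- heapq._siftup(heap, pos)  (pos strictly increases below len(heap), so len(heap) steps suffice)
def pvSiftup (h : List Int) (pos : Nat) : List Int :=
  let newitem := h.getD pos 0
  let r := pvSuLoop h.length h pos
  pvSiftdown (r.1.set r.2 newitem) pos r.2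

-- heapq.heapify: for i in reversed(range(n//2)): _siftup(x, i)
def pvHeapify (h : List Int) : List Int :=
  (List.range (h.length / 2)).reverse.foldl (fun a i => pvSiftup a i) h

-- heapq.heappop
def pvHeappop (h : List Int) : Int × List Int :=
  let lastelt := h.getD (h.length - 1) 0
  let h' := h.dropLast
  if 0 < h'.length then
    (h'.getD 0 0, pvSiftup (h'.set 0 lastelt) 0)
  else (lastelt, h')

-- heapq.heappush
def pvHeappush (h : List Int) (item : Int) : List Int :=
  pvSiftdown (h ++ [item]) 0 h.length

-- the main while-loop of A (each iteration shortens the heap by one, so len(heap) steps suffice)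
def pvLoopA (fuel : Nat) (h : List Int) (K : Int) (cnt : Int) : List Int × Int :=
  match fuel with
  | 0 => (h, cnt)
  | fuel + 1 =>
    if h.getD 0 0 < K ∧ 1 < h.length then
      let p1 := pvHeappop h
      let p2 := pvHeappop p1.2
      pvLoopA fuel (pvHeappush p2.2 (p1.1 + p2.1 * 2)) K (cnt + 1)
    else (h, cnt)

def solution (scoville : List Int) (K : Int) : Int :=
  let h := pvHeapify scoville
  let r := pvLoopA h.length h K 0
  if (PySem.List.min? r.1 (fun x => x)).getD 0 < K then -1 else r.2

-- ===== PORT B =====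
-- Source B's while-True loop over the four state variables xs, i, merged, j plus the counter;
-- the two sequential pops are written out as the four front-selection cases (same tests,
-- same order, same values); the loop shortens the pending count (len(xs)-i)+(len(merged)-j)
-- by one each iteration, so a fuel of len(xs) is never exhausted and is a totality guard only.
def pvQLoop (fuel : Nat) (xs : List Int) (i : Nat) (merged : List Int) (j : Nat) (K cnt : Int) : Int × Int :=
  match fuel with
  | 0 => (0, cnt)
  | fuel + 1 =>
    let m := if i < xs.length ∧ (merged.length ≤ j ∨ xs.getD i 0 ≤ merged.getD j 0)
             then xs.getD i 0 else merged.getD j 0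
    if m < K ∧ 1 < (xs.length - i) + (merged.length - j) then
      if i < xs.length ∧ (merged.length ≤ j ∨ xs.getD i 0 ≤ merged.getD j 0) then
        if i + 1 < xs.length ∧ (merged.length ≤ j ∨ xs.getD (i + 1) 0 ≤ merged.getD j 0) then
          pvQLoop fuel xs (i + 2) (merged ++ [xs.getD i 0 + xs.getD (i + 1) 0 * 2]) j K (cnt + 1)
        else
          pvQLoop fuel xs (i + 1) (merged ++ [xs.getD i 0 + merged.getD j 0 * 2]) (j + 1) K (cnt + 1)
      else
        if i < xs.length ∧ (merged.length ≤ j + 1 ∨ xs.getD i 0 ≤ merged.getD (j + 1) 0) then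
          pvQLoop fuel xs (i + 1) (merged ++ [merged.getD j 0 + xs.getD i 0 * 2]) (j + 1) K (cnt + 1)
        else
          pvQLoop fuel xs i (merged ++ [merged.getD j 0 + merged.getD (j + 1) 0 * 2]) (j + 2) K (cnt + 1)
    else (m, cnt)

def solution_alt (scoville : List Int) (K : Int) : Int :=
  let xs := PySem.List.sorted scoville (fun x => x) false
  let r := pvQLoop xs.length xs 0 [] 0 K 0
  if r.1 < K then -1 else r.2

-- ===== PRECONDITION & SPEC =====
-- Pre_ excludes only the empty list, on which A raises IndexError (scoville[0]).
def Pre_solution (scoville : List Int) (K : Int) : Prop := scoville ≠ []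
instance (scoville : List Int) (K : Int) : Decidable (Pre_solution scoville K) := by
  unfold Pre_solution; infer_instance

def pvWitness_solution : List Int × Int := ([1, 2, 9, 3], 7)

def Spec_solution (scoville : List Int) (K : Int) (out : Int) : Prop := out = solution_alt scoville K
instance (scoville : List Int) (K : Int) (out : Int) : Decidable (Spec_solution scoville K out) := by
  unfold Spec_solution; infer_instance

-- ===== CLAIM (what is proved, stated in full; the proofs are below) =====
def Claim_equal_solution : Prop := ∀ (scoville : List Int) (K : Int), Dom_solution scoville K → Pre_solution scoville K → Spec_solution scoville K (solution scoville K)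

-- ===== LEMMAS AND PROOFS =====

-- the common intermediate: the greedy loop run directly on a sorted pool, the mixed
-- value re-inserted at its ordered position
def pvPoolLoop (fuel : Nat) (pool : List Int) (K cnt : Int) : List Int × Int :=
  match fuel with
  | 0 => (pool, cnt)
  | fuel + 1 =>
    if pool.getD 0 0 < K ∧ 1 < pool.length then
      pvPoolLoop fuel
        (List.orderedInsert (· ≤ ·) (pool.getD 0 0 + pool.getD 1 0 * 2) (pool.drop 2))
        K (cnt + 1)
    else (pool, cnt)

theorem pvSdLoop_len (fuel : Nat) : ∀ (h : List Int) (s p : Nat) (ni : Int),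
    (pvSdLoop fuel h s p ni).1.length = h.length := by
  induction fuel with
  | zero => intro h s p ni; rfl
  | succ fuel ih =>
    intro h s p ni
    rw [pvSdLoop]
    split
    · dsimp only
      split
      · rw [ih]; simp
      · rfl
    · rfl

theorem pvSiftdown_len (h : List Int) (s p : Nat) :
    (pvSiftdown h s p).length = h.length := by
  simp [pvSiftdown, pvSdLoop_len]

theorem pvSuLoop_len (fuel : Nat) : ∀ (h : List Int) (p : Nat),
    (pvSuLoop fuel h p).1.length = h.length := by
  induction fuel with
  | zero => intro h p; rfl
  | succ fuel ih =>
    intro h p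
    rw [pvSuLoop]
    dsimp only
    split
    · rw [ih]; simp
    · rfl

theorem pvSiftup_len (h : List Int) (p : Nat) :
    (pvSiftup h p).length = h.length := by
  simp [pvSiftup, pvSiftdown_len, pvSuLoop_len]

theorem pvHeappop_len (h : List Int) :
    (pvHeappop h).2.length = h.length - 1 := by
  unfold pvHeappop
  dsimp only
  split <;> simp [pvSiftup_len]

theorem pvHeappush_len (h : List Int) (v : Int) :
    (pvHeappush h v).length = h.length + 1 := by
  simp [pvHeappush, pvSiftdown_len]


-- parent index in the implicit binary tree
def pvPar (j : Nat) : Nat := (j - 1) / 2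

-- membership in the subtree rooted at s
def pvSub (s : Nat) : Nat → Bool
  | j => if j ≤ s then j == s else pvSub s ((j - 1) / 2)
termination_by j => j
decreasing_by have := Nat.div_le_self (j - 1) 2; omega

theorem pvSub_self (s : Nat) : pvSub s s = true := by
  unfold pvSub; simp

theorem pvSub_ge {s j : Nat} (h : pvSub s j = true) : s ≤ j := by
  unfold pvSub at h
  by_cases hle : j ≤ s
  · simp [hle] at h; omega
  · omega

theorem pvSub_step {s j : Nat} (h : s < j) : pvSub s j = pvSub s (pvPar j) := by
  conv_lhs => unfold pvSub
  simp [pvPar, Nat.not_le.mpr h]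

theorem pvSub_par {s j : Nat} (hj : pvSub s j = true) (hne : j ≠ s) :
    pvSub s (pvPar j) = true ∧ s < j := by
  have hge := pvSub_ge hj
  have hlt : s < j := by omega
  exact ⟨by rwa [pvSub_step hlt] at hj, hlt⟩

theorem pvSub_child {s j c : Nat} (hj : pvSub s j = true) (hc : pvPar c = j) (hcs : s < c) :
    pvSub s c = true := by
  rw [pvSub_step hcs, hc]; exact hj

theorem pvSub_zero (j : Nat) : pvSub 0 j = true := by
  induction j using Nat.strong_induction_on with
  | _ j ih =>
    unfold pvSub
    by_cases h : j ≤ 0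
    · simp [h]; omega
    · simp [h]
      exact ih _ (by have := Nat.div_le_self (j - 1) 2; omega)

theorem pvPar_child_gt {p j : Nat} (h0 : 0 < j) (h : pvPar j = p) : 2 * p + 1 ≤ j ∧ j ≤ 2 * p + 2 := by
  unfold pvPar at h; omega

theorem pvPar_lt {j : Nat} (h : 0 < j) : pvPar j < j := by
  unfold pvPar; omega

-- getD/set basics
theorem pvGetD_set_self {l : List Int} {i : Nat} (h : i < l.length) (v : Int) :
    (l.set i v).getD i 0 = v := by
  simp [List.getD, List.getElem?_set_self, h]

theorem pvGetD_set_ne {l : List Int} {i j : Nat} (h : i ≠ j) (v : Int) :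
    (l.set i v).getD j 0 = l.getD j 0 := by
  simp [List.getD, List.getElem?_set_ne h]

-- multiset of a set: replace one element (additive form)
theorem pvMsSet {l : List Int} {i : Nat} (h : i < l.length) (v : Int) :
    (↑(l.set i v) : Multiset Int) + {l.getD i 0} = (↑l : Multiset Int) + {v} := by
  induction l generalizing i with
  | nil => simp at h
  | cons a t ih =>
    cases i with
    | zero =>
      simp only [List.set_cons_zero, List.getD_cons_zero, ← Multiset.cons_coe,
        ← Multiset.singleton_add]
      abel
    | succ n =>
      have hn : n < t.length := by simpa using h
      have ht := ih (i := n) hn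
      simp only [List.set_cons_succ, List.getElem?_cons_succ, List.getD, ← Multiset.cons_coe,
        ← Multiset.singleton_add] at ht ⊢
      rw [add_assoc, ht, ← add_assoc]

-- heap-ordering on the subtree rooted at s, with pairs whose parent is the "hole" p excluded
def pvAH (h : List Int) (s p : Nat) : Prop :=
  ∀ j, 0 < j → j < h.length → pvSub s j = true → j ≠ s → pvPar j ≠ p →
    h.getD (pvPar j) 0 ≤ h.getD j 0

-- full heap-ordering on the subtree rooted at s
def pvHeapOn (h : List Int) (s : Nat) : Prop :=
  ∀ j, 0 < j → j < h.length → pvSub s j = true → j ≠ s →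
    h.getD (pvPar j) 0 ≤ h.getD j 0

def pvIsHeap (h : List Int) : Prop := ∀ j, 0 < j → j < h.length → h.getD (pvPar j) 0 ≤ h.getD j 0

-- root of a heap is minimal
theorem pvRootMin {h : List Int} (hh : pvIsHeap h) : ∀ j, j < h.length → h.getD 0 0 ≤ h.getD j 0 := by
  intro j
  induction j using Nat.strong_induction_on with
  | _ j ih =>
    intro hj
    cases Nat.eq_zero_or_pos j with
    | inl h0 => simp [h0]
    | inr h0 =>
      have hp := pvPar_lt h0
      exact le_trans (ih _ hp (lt_trans hp hj)) (hh j h0 hj)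

theorem pvSetGetDSelf {l : List Int} {i : Nat} (h : i < l.length) :
    l.set i (l.getD i 0) = l := by
  rw [List.getD_eq_getElem l 0 h]
  exact List.set_getElem_self h

-- ===== sift-down correctness =====
theorem pvSdMain (s : Nat) (ni : Int) (fuel : Nat) : ∀ (h : List Int) (pos : Nat),
    pos ≤ fuel → s ≤ pos → pvSub s pos = true → pos < h.length →
    (∀ j, 0 < j → j < h.length → pvSub s j = true → j ≠ s → j ≠ pos → pvPar j ≠ pos →
      h.getD (pvPar j) 0 ≤ h.getD j 0) →
    (∀ j, 0 < j → j < h.length → pvPar j = pos → ni ≤ h.getD j 0) →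
    (s < pos → ∀ j, 0 < j → j < h.length → pvPar j = pos →
      h.getD (pvPar pos) 0 ≤ h.getD j 0) →
    (∀ j, 0 < j → j < h.length → pvSub s j = true → j ≠ s →
      ((pvSdLoop fuel h s pos ni).1.set (pvSdLoop fuel h s pos ni).2 ni).getD (pvPar j) 0 ≤
      ((pvSdLoop fuel h s pos ni).1.set (pvSdLoop fuel h s pos ni).2 ni).getD j 0)
    ∧ (∀ j, pvSub s j = false →
      ((pvSdLoop fuel h s pos ni).1.set (pvSdLoop fuel h s pos ni).2 ni).getD j 0 = h.getD j 0) := by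
  induction fuel with
  | zero =>
    intro h pos hfuel hs hsub hlen hq2 hq3 hq4
    have hjne_pos : ∀ j : Nat, pvSub s j = false → j ≠ pos := by
      intro j hjf hc
      rw [hc, hsub] at hjf
      cases hjf
    rw [pvSdLoop]
    have hps : pos = s := by omega
    constructor
    · intro j hj0 hjlen hjsub hjs
      by_cases hpjp : pvPar j = pos
      · rw [hpjp, pvGetD_set_self hlen,
          pvGetD_set_ne (show pos ≠ j by have := pvPar_child_gt hj0 hpjp; omega)]
        exact hq3 j hj0 hjlen hpjp
      · have hjp : j ≠ pos := by rw [hps]; exact hjs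
        rw [pvGetD_set_ne (fun hc => hpjp hc.symm), pvGetD_set_ne (Ne.symm hjp)]
        exact hq2 j hj0 hjlen hjsub hjs hjp hpjp
    · intro j hjf
      exact pvGetD_set_ne (fun hc => hjne_pos j hjf hc.symm) _
  | succ fuel ih =>
    intro h pos hfuel hs hsub hlen hq2 hq3 hq4
    have hjne_pos : ∀ j : Nat, pvSub s j = false → j ≠ pos := by
      intro j hjf hc
      rw [hc, hsub] at hjf
      cases hjf
    rw [pvSdLoop]
    split
    · rename_i hlt
      dsimp only
      split
      · rename_i hni
        -- recursive case: shift the parent down into pos, continue at the parent position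
        have hppar : pvPar pos = (pos - 1) / 2 := rfl
        have hpplt : (pos - 1) / 2 < pos := by have := Nat.div_le_self (pos - 1) 2; omega
        have hsp := pvSub_par hsub (by omega)
        have hsub_pp : pvSub s ((pos - 1) / 2) = true := by rw [← hppar]; exact hsp.1
        have hs_pp : s ≤ (pos - 1) / 2 := pvSub_ge hsub_pp
        have hlen' : ((pos - 1) / 2) < (h.set pos (h.getD ((pos - 1) / 2) 0)).length := by
          simp only [List.length_set]; omega
        -- any in-range child of pp other than pos is at least h[pp]
        have hchild : ∀ j, 0 < j → j < h.length → pvPar j = (pos - 1) / 2 → j ≠ pos →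
            h.getD ((pos - 1) / 2) 0 ≤ h.getD j 0 := by
          intro j hj0 hjlen hparj hjp
          have hcg := pvPar_child_gt hj0 hparj
          have := hq2 j hj0 hjlen (pvSub_child hsub_pp hparj (by omega)) (by omega) hjp
            (by rw [hparj]; omega)
          rwa [hparj] at this
        have hq2' : ∀ j, 0 < j → j < (h.set pos (h.getD ((pos - 1) / 2) 0)).length →
            pvSub s j = true → j ≠ s → j ≠ (pos - 1) / 2 → pvPar j ≠ (pos - 1) / 2 →
            (h.set pos (h.getD ((pos - 1) / 2) 0)).getD (pvPar j) 0 ≤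
            (h.set pos (h.getD ((pos - 1) / 2) 0)).getD j 0 := by
          intro j hj0 hjlen hjsub hjs hjpp hparpp
          simp only [List.length_set] at hjlen
          by_cases hjp : j = pos
          · subst hjp; exact absurd hppar hparpp
          · by_cases hpjp : pvPar j = pos
            · rw [hpjp, pvGetD_set_self hlen, pvGetD_set_ne (Ne.symm hjp)]
              have := hq4 hlt j hj0 hjlen hpjp
              rwa [hppar] at this
            · rw [pvGetD_set_ne (fun hc => hpjp hc.symm), pvGetD_set_ne (Ne.symm hjp)]
              exact hq2 j hj0 hjlen hjsub hjs hjp hpjp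
        have hq3' : ∀ j, 0 < j → j < (h.set pos (h.getD ((pos - 1) / 2) 0)).length →
            pvPar j = (pos - 1) / 2 → ni ≤ (h.set pos (h.getD ((pos - 1) / 2) 0)).getD j 0 := by
          intro j hj0 hjlen hparj
          simp only [List.length_set] at hjlen
          by_cases hjp : j = pos
          · rw [hjp, pvGetD_set_self hlen]; exact le_of_lt hni
          · rw [pvGetD_set_ne (Ne.symm hjp)]
            exact le_of_lt (lt_of_lt_of_le hni (hchild j hj0 hjlen hparj hjp))
        have hq4' : s < (pos - 1) / 2 → ∀ j, 0 < j →
            j < (h.set pos (h.getD ((pos - 1) / 2) 0)).length → pvPar j = (pos - 1) / 2 →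
            (h.set pos (h.getD ((pos - 1) / 2) 0)).getD (pvPar ((pos - 1) / 2)) 0 ≤
            (h.set pos (h.getD ((pos - 1) / 2) 0)).getD j 0 := by
          intro hspp j hj0 hjlen hparj
          simp only [List.length_set] at hjlen
          have hpppos : pvPar ((pos - 1) / 2) ≠ pos := by
            have := pvPar_lt (show 0 < (pos - 1) / 2 by omega); omega
          have hkey : h.getD (pvPar ((pos - 1) / 2)) 0 ≤ h.getD ((pos - 1) / 2) 0 :=
            hq2 ((pos - 1) / 2) (by omega) (by omega) hsub_pp (by omega) (by omega) hpppos
          rw [pvGetD_set_ne (Ne.symm hpppos)]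
          by_cases hjp : j = pos
          · rw [hjp, pvGetD_set_self hlen]; exact hkey
          · rw [pvGetD_set_ne (Ne.symm hjp)]
            exact hkey.trans (hchild j hj0 hjlen hparj hjp)
        have hr := ih (h.set pos (h.getD ((pos - 1) / 2) 0)) ((pos - 1) / 2)
          (by omega) hs_pp hsub_pp hlen' hq2' hq3' hq4'
        constructor
        · intro j hj0 hjlen hjsub hjs
          exact hr.1 j hj0 (by simp only [List.length_set]; exact hjlen) hjsub hjs
        · intro j hjf
          rw [hr.2 j hjf]
          exact pvGetD_set_ne (fun hc => hjne_pos j hjf hc.symm) _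
      · rename_i hnp
        -- stop: newitem is not below its parent; write it at pos
        constructor
        · intro j hj0 hjlen hjsub hjs
          by_cases hjp : j = pos
          · subst hjp
            rw [pvGetD_set_ne (pvPar_lt hj0).ne', pvGetD_set_self hlen]
            exact not_lt.mp hnp
          · by_cases hpjp : pvPar j = pos
            · rw [hpjp, pvGetD_set_self hlen, pvGetD_set_ne (Ne.symm hjp)]
              exact hq3 j hj0 hjlen hpjp
            · rw [pvGetD_set_ne (fun hc => hpjp hc.symm), pvGetD_set_ne (Ne.symm hjp)]
              exact hq2 j hj0 hjlen hjsub hjs hjp hpjp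
        · intro j hjf
          exact pvGetD_set_ne (fun hc => hjne_pos j hjf hc.symm) _
    · rename_i hnlt
      -- pos = s: the loop does not run; write newitem at s
      have hps : pos = s := by omega
      constructor
      · intro j hj0 hjlen hjsub hjs
        by_cases hpjp : pvPar j = pos
        · rw [hpjp, pvGetD_set_self hlen,
            pvGetD_set_ne (show pos ≠ j by have := pvPar_child_gt hj0 hpjp; omega)]
          exact hq3 j hj0 hjlen hpjp
        · have hjp : j ≠ pos := by rw [hps]; exact hjs
          rw [pvGetD_set_ne (fun hc => hpjp hc.symm), pvGetD_set_ne (Ne.symm hjp)]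
          exact hq2 j hj0 hjlen hjsub hjs hjp hpjp
      · intro j hjf
        exact pvGetD_set_ne (fun hc => hjne_pos j hjf hc.symm) _

-- multiset invariant of the sift-down loop
theorem pvSdMs (s : Nat) (ni : Int) (fuel : Nat) : ∀ (h : List Int) (pos : Nat),
    pos ≤ fuel → pos < h.length →
    (↑((pvSdLoop fuel h s pos ni).1.set (pvSdLoop fuel h s pos ni).2 ni) : Multiset Int) =
    ↑(h.set pos ni) := by
  induction fuel with
  | zero =>
    intro h pos hfuel hlen
    rfl
  | succ fuel ih =>
    intro h pos hfuel hlen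
    rw [pvSdLoop]
    split
    · rename_i hlt
      dsimp only
      split
      · rename_i hni
        have hpplt : (pos - 1) / 2 < pos := by have := Nat.div_le_self (pos - 1) 2; omega
        have hpplen : (pos - 1) / 2 < (h.set pos (h.getD ((pos - 1) / 2) 0)).length := by
          simp only [List.length_set]; omega
        have h1 := ih (h.set pos (h.getD ((pos - 1) / 2) 0)) ((pos - 1) / 2)
          (by omega) (by simp only [List.length_set]; omega)
        rw [h1]
        have e1 := pvMsSet (l := h.set pos (h.getD ((pos - 1) / 2) 0)) (i := (pos - 1) / 2)
          hpplen ni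
        rw [pvGetD_set_ne (show pos ≠ (pos - 1) / 2 by omega)] at e1
        have e2 := pvMsSet (l := h) (i := pos) hlen (h.getD ((pos - 1) / 2) 0)
        have e3 := pvMsSet (l := h) (i := pos) hlen ni
        apply add_right_cancel
          (b := ({(h.getD ((pos - 1) / 2) 0 : Int)} : Multiset Int) + {h.getD pos 0})
        calc (↑((h.set pos (h.getD ((pos - 1) / 2) 0)).set ((pos - 1) / 2) ni) : Multiset Int)
              + ({h.getD ((pos - 1) / 2) 0} + {h.getD pos 0})
            = (↑((h.set pos (h.getD ((pos - 1) / 2) 0)).set ((pos - 1) / 2) ni)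
              + {h.getD ((pos - 1) / 2) 0}) + {h.getD pos 0} := by rw [add_assoc]
          _ = (↑(h.set pos (h.getD ((pos - 1) / 2) 0)) + {ni}) + {h.getD pos 0} := by rw [e1]
          _ = (↑(h.set pos (h.getD ((pos - 1) / 2) 0)) + {h.getD pos 0}) + {ni} := by
              rw [add_right_comm]
          _ = (↑h + {h.getD ((pos - 1) / 2) 0}) + {ni} := by rw [e2]
          _ = (↑h + {ni}) + {h.getD ((pos - 1) / 2) 0} := by rw [add_right_comm]
          _ = (↑(h.set pos ni) + {h.getD pos 0}) + {h.getD ((pos - 1) / 2) 0} := by rw [e3]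
          _ = ↑(h.set pos ni) + ({h.getD ((pos - 1) / 2) 0} + {h.getD pos 0}) := by
              rw [add_assoc, add_comm ({(h.getD pos 0 : Int)} : Multiset Int)]
      · rfl
    · rfl

-- ===== sift-up (to-leaf phase) correctness =====
theorem pvSuMain (s : Nat) (fuel : Nat) : ∀ (h : List Int) (pos : Nat),
    h.length - pos ≤ fuel →
    pvSub s pos = true → pos < h.length →
    pvAH h s pos →
    (s < pos → ∀ j, 0 < j → j < h.length → pvPar j = pos →
      h.getD (pvPar pos) 0 ≤ h.getD j 0) →
    pvSub s (pvSuLoop fuel h pos).2 = true ∧ (pvSuLoop fuel h pos).2 < h.length ∧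
    h.length ≤ 2 * (pvSuLoop fuel h pos).2 + 1 ∧
    pvAH (pvSuLoop fuel h pos).1 s (pvSuLoop fuel h pos).2 ∧
    (∀ j, pvSub s j = false → (pvSuLoop fuel h pos).1.getD j 0 = h.getD j 0) := by
  induction fuel with
  | zero =>
    intro h pos hfuel hsub hlen hAH hv3
    exact absurd hlen (by omega)
  | succ fuel ih =>
    intro h pos hfuel hsub hlen hAH hv3
    have hspos := pvSub_ge hsub
    rw [pvSuLoop]
    dsimp only
    split
    · rename_i hlt
      -- a child exists: move the smaller child up and continue there
      have hmain : ∀ c, 2 * pos + 1 ≤ c → c ≤ 2 * pos + 2 → c < h.length →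
          (∀ j, 0 < j → j < h.length → pvPar j = pos → h.getD c 0 ≤ h.getD j 0) →
          pvSub s (pvSuLoop fuel (h.set pos (h.getD c 0)) c).2 = true ∧
          (pvSuLoop fuel (h.set pos (h.getD c 0)) c).2 < h.length ∧
          h.length ≤ 2 * (pvSuLoop fuel (h.set pos (h.getD c 0)) c).2 + 1 ∧
          pvAH (pvSuLoop fuel (h.set pos (h.getD c 0)) c).1 s (pvSuLoop fuel (h.set pos (h.getD c 0)) c).2 ∧
          (∀ j, pvSub s j = false →
            (pvSuLoop fuel (h.set pos (h.getD c 0)) c).1.getD j 0 = h.getD j 0) := by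
        intro c hc1 hc2 hclen hmin
        have hparc : pvPar c = pos := by unfold pvPar; omega
        have hsubc : pvSub s c = true := pvSub_child hsub hparc (by omega)
        have hAH' : pvAH (h.set pos (h.getD c 0)) s c := by
          intro j hj0 hjlen hjsub hjs hparjc
          simp only [List.length_set] at hjlen
          by_cases hjp : j = pos
          · subst hjp
            rw [pvGetD_set_ne (pvPar_lt hj0).ne', pvGetD_set_self hlen]
            exact hv3 (by omega) c (by omega) hclen hparc
          · by_cases hpjp : pvPar j = pos
            · rw [hpjp, pvGetD_set_self hlen, pvGetD_set_ne (Ne.symm hjp)]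
              exact hmin j hj0 hjlen hpjp
            · rw [pvGetD_set_ne (fun hc => hpjp hc.symm), pvGetD_set_ne (Ne.symm hjp)]
              exact hAH j hj0 hjlen hjsub hjs hpjp
        have hv3' : s < c → ∀ j, 0 < j → j < (h.set pos (h.getD c 0)).length → pvPar j = c →
            (h.set pos (h.getD c 0)).getD (pvPar c) 0 ≤ (h.set pos (h.getD c 0)).getD j 0 := by
          intro _ j hj0 hjlen hparj
          simp only [List.length_set] at hjlen
          have hcg := pvPar_child_gt hj0 hparj
          rw [hparc, pvGetD_set_self hlen, pvGetD_set_ne (show pos ≠ j by omega)]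
          have := hAH j hj0 hjlen (pvSub_child hsubc hparj (by omega)) (by omega)
            (by rw [hparj]; omega)
          rwa [hparj] at this
        have hr := ih (h.set pos (h.getD c 0)) c
          (by simp only [List.length_set]; omega) hsubc
          (by simp only [List.length_set]; omega) hAH' hv3'
        simp only [List.length_set] at hr
        refine ⟨hr.1, hr.2.1, hr.2.2.1, hr.2.2.2.1, ?_⟩
        intro j hjf
        rw [hr.2.2.2.2 j hjf]
        exact pvGetD_set_ne (fun hc => by rw [← hc, hsub] at hjf; cases hjf) _
      split
      · rename_i hcc
        exact hmain (2 * pos + 1 + 1) (by omega) (by omega) hcc.1 (by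
          intro j hj0 hjlen hparj
          have hcg := pvPar_child_gt hj0 hparj
          rcases (by omega : j = 2 * pos + 1 ∨ j = 2 * pos + 1 + 1) with hj | hj
          · rw [hj]; exact not_lt.mp hcc.2
          · rw [hj])
      · rename_i hcc
        exact hmain (2 * pos + 1) (by omega) (by omega) hlt (by
          intro j hj0 hjlen hparj
          have hcg := pvPar_child_gt hj0 hparj
          rcases (by omega : j = 2 * pos + 1 ∨ j = 2 * pos + 1 + 1) with hj | hj
          · rw [hj]
          · rw [hj]
            have : ¬ ¬ (h.getD (2 * pos + 1) 0 < h.getD (2 * pos + 1 + 1) 0) := by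
              intro hb; exact hcc ⟨by omega, hb⟩
            exact le_of_lt (not_not.mp this))
    · rename_i hnlt
      exact ⟨hsub, hlen, by omega, hAH, fun j _ => rfl⟩

theorem pvSuMs (fuel : Nat) : ∀ (h : List Int) (pos : Nat), h.length - pos ≤ fuel →
    pos < h.length →
    ∀ x : Int, (↑((pvSuLoop fuel h pos).1.set (pvSuLoop fuel h pos).2 x) : Multiset Int) =
    ↑(h.set pos x) := by
  induction fuel with
  | zero =>
    intro h pos hfuel hlen x
    exact absurd hlen (by omega)
  | succ fuel ih =>
    intro h pos hfuel hlen x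
    rw [pvSuLoop]
    dsimp only
    split
    · rename_i hlt
      have hmain : ∀ c, pos < c → c < h.length →
          (↑((pvSuLoop fuel (h.set pos (h.getD c 0)) c).1.set
              (pvSuLoop fuel (h.set pos (h.getD c 0)) c).2 x) : Multiset Int) =
          ↑(h.set pos x) := by
        intro c hc1 hclen
        have h1 := ih (h.set pos (h.getD c 0)) c
          (by simp only [List.length_set]; omega) (by simp only [List.length_set]; omega) x
        rw [h1]
        have e1 := pvMsSet (l := h.set pos (h.getD c 0)) (i := c)
          (by simp only [List.length_set]; omega) x
        rw [pvGetD_set_ne (show pos ≠ c by omega)] at e1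
        have e2 := pvMsSet (l := h) (i := pos) hlen (h.getD c 0)
        have e3 := pvMsSet (l := h) (i := pos) hlen x
        apply add_right_cancel (b := ({(h.getD c 0 : Int)} : Multiset Int) + {h.getD pos 0})
        calc (↑((h.set pos (h.getD c 0)).set c x) : Multiset Int)
              + ({h.getD c 0} + {h.getD pos 0})
            = (↑((h.set pos (h.getD c 0)).set c x) + {h.getD c 0}) + {h.getD pos 0} := by
              rw [add_assoc]
          _ = (↑(h.set pos (h.getD c 0)) + {x}) + {h.getD pos 0} := by rw [e1]
          _ = (↑(h.set pos (h.getD c 0)) + {h.getD pos 0}) + {x} := by rw [add_right_comm]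
          _ = (↑h + {h.getD c 0}) + {x} := by rw [e2]
          _ = (↑h + {x}) + {h.getD c 0} := by rw [add_right_comm]
          _ = (↑(h.set pos x) + {h.getD pos 0}) + {h.getD c 0} := by rw [e3]
          _ = ↑(h.set pos x) + ({h.getD c 0} + {h.getD pos 0}) := by
              rw [add_assoc, add_comm ({(h.getD pos 0 : Int)} : Multiset Int)]
      split
      · rename_i hcc
        exact hmain (2 * pos + 1 + 1) (by omega) hcc.1
      · exact hmain (2 * pos + 1) (by omega) hlt
    · rfl

-- ===== siftup (full) correctness, specialised to start = pos =====
theorem pvSiftupMain {h : List Int} {pos : Nat} (hl : pos < h.length)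
    (hpre : pvAH h pos pos) :
    (↑(pvSiftup h pos) : Multiset Int) = ↑h ∧
    pvHeapOn (pvSiftup h pos) pos ∧
    (∀ j, pvSub pos j = false → (pvSiftup h pos).getD j 0 = h.getD j 0) := by
  obtain ⟨hsubp, hplen, hleaf, hAH1, hoff⟩ :=
    pvSuMain pos h.length h pos (by omega) (pvSub_self pos) hl hpre
      (fun hc => absurd hc (lt_irrefl pos))
  have hsulen : (pvSuLoop h.length h pos).1.length = h.length := pvSuLoop_len h.length h pos
  unfold pvSiftup pvSiftdown
  dsimp only
  set h1 := (pvSuLoop h.length h pos).1 with hh1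
  set p1 := (pvSuLoop h.length h pos).2 with hp1
  set ni := h.getD pos 0 with hni
  have hp1len : p1 < h1.length := by rw [hsulen]; exact hplen
  have hgni : (h1.set p1 ni).getD p1 0 = ni := pvGetD_set_self hp1len ni
  rw [hgni]
  have hglen : (h1.set p1 ni).length = h.length := by simp only [List.length_set]; exact hsulen
  have hsd := pvSdMain pos ni p1 (h1.set p1 ni) p1 le_rfl (pvSub_ge hsubp) hsubp
    (by rw [hglen]; exact hplen)
    (by
      intro j hj0 hjlen hjsub hjs hjp1 hparp1
      rw [hglen] at hjlen
      rw [pvGetD_set_ne (fun hc => hparp1 hc.symm), pvGetD_set_ne (Ne.symm hjp1)]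
      exact hAH1 j hj0 (by rw [hsulen]; exact hjlen) hjsub hjs hparp1)
    (by
      intro j hj0 hjlen hparj
      rw [hglen] at hjlen
      have := pvPar_child_gt hj0 hparj
      omega)
    (by
      intro _ j hj0 hjlen hparj
      rw [hglen] at hjlen
      have := pvPar_child_gt hj0 hparj
      omega)
  have hms := pvSdMs pos ni p1 (h1.set p1 ni) p1 le_rfl (by rw [hglen]; exact hplen)
  have hrlen : ((pvSdLoop p1 (h1.set p1 ni) pos p1 ni).1.set
      (pvSdLoop p1 (h1.set p1 ni) pos p1 ni).2 ni).length = h.length := by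
    simp only [List.length_set, pvSdLoop_len]; exact hsulen
  refine ⟨?_, ?_, ?_⟩
  · rw [hms, List.set_set]
    have := pvSuMs h.length h pos (by omega) hl ni
    rw [← hh1, ← hp1] at this
    rw [this, hni, pvSetGetDSelf hl]
  · intro j hj0 hjlen hjsub hjs
    rw [hrlen] at hjlen
    exact hsd.1 j hj0 (by rw [hglen]; exact hjlen) hjsub hjs
  · intro j hjf
    rw [hsd.2 j hjf]
    have hjp1 : p1 ≠ j := fun hc => by rw [hc, hjf] at hsubp; cases hsubp
    rw [pvGetD_set_ne hjp1]
    exact hoff j hjf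

-- ===== heapify =====
theorem pvHeapifyGo (m : Nat) : ∀ h : List Int, 2 * m ≤ h.length →
    (∀ j, 0 < j → j < h.length → m ≤ pvPar j → h.getD (pvPar j) 0 ≤ h.getD j 0) →
    ((List.range m).reverse.foldl (fun a i => pvSiftup a i) h).length = h.length ∧
    (↑((List.range m).reverse.foldl (fun a i => pvSiftup a i) h) : Multiset Int) = ↑h ∧
    pvIsHeap ((List.range m).reverse.foldl (fun a i => pvSiftup a i) h) := by
  induction m with
  | zero =>
    intro h _ hinv
    exact ⟨rfl, rfl, fun j hj0 hjlen => hinv j hj0 hjlen (Nat.zero_le _)⟩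
  | succ m ih =>
    intro h hlen2 hinv
    rw [List.range_succ, List.reverse_append]
    simp only [List.reverse_singleton, List.singleton_append, List.foldl_cons]
    have hm : m < h.length := by omega
    have hpre : pvAH h m m := by
      intro j hj0 hjlen hjsub hjs hparj
      have hps := pvSub_par hjsub hjs
      have := pvSub_ge hps.1
      exact hinv j hj0 hjlen (by omega)
    obtain ⟨hms, hheap, hoff⟩ := pvSiftupMain hm hpre
    have hlen' := pvSiftup_len h m
    have hinv' : ∀ j, 0 < j → j < (pvSiftup h m).length → m ≤ pvPar j →
        (pvSiftup h m).getD (pvPar j) 0 ≤ (pvSiftup h m).getD j 0 := by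
      intro j hj0 hjlen hpar
      rw [hlen'] at hjlen
      by_cases hjsub : pvSub m j = true
      · by_cases hjm : j = m
        · exfalso; have := pvPar_lt hj0; omega
        · exact hheap j hj0 (by rw [hlen']; exact hjlen) hjsub hjm
      · have hjsub' : pvSub m j = false := by
          cases hb : pvSub m j with
          | true => exact absurd hb hjsub
          | false => rfl
        have hparsub : pvSub m (pvPar j) = false := by
          cases hb : pvSub m (pvPar j) with
          | true =>
            exfalso
            have := pvSub_child hb (rfl : pvPar j = pvPar j)
              (show m < j by have := pvPar_lt hj0; omega)
            rw [this] at hjsub'; cases hjsub'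
          | false => rfl
        have hparm : pvPar j ≠ m := by
          intro hc; rw [hc, pvSub_self] at hparsub; cases hparsub
        rw [hoff j hjsub', hoff (pvPar j) hparsub]
        exact hinv j hj0 hjlen (by omega)
    obtain ⟨l1, m1, h1⟩ := ih (pvSiftup h m) (by rw [hlen']; omega) hinv'
    exact ⟨by rw [l1, hlen'], by rw [m1, hms], h1⟩

theorem pvHeapifyMain (h : List Int) :
    (↑(pvHeapify h) : Multiset Int) = ↑h ∧ pvIsHeap (pvHeapify h) := by
  unfold pvHeapify
  have hg := pvHeapifyGo (h.length / 2) h (by omega) (by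
    intro j hj0 hjlen hpar
    exfalso
    have := pvPar_child_gt hj0 (rfl : pvPar j = pvPar j)
    omega)
  exact ⟨hg.2.1, hg.2.2⟩

-- ===== heappop / heappush =====
theorem pvHeappopMain {h : List Int} (hh : pvIsHeap h) (hl : 1 ≤ h.length) :
    (pvHeappop h).1 = h.getD 0 0 ∧
    (↑h : Multiset Int) = (pvHeappop h).1 ::ₘ ↑(pvHeappop h).2 ∧
    pvIsHeap (pvHeappop h).2 := by
  by_cases hone : h.length = 1
  · obtain ⟨a, ha⟩ := List.length_eq_one_iff.mp hone
    subst ha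
    refine ⟨rfl, by simp [pvHeappop], ?_⟩
    intro j hj0 hjlen
    simp [pvHeappop] at hjlen
  · have hlen2 : 2 ≤ h.length := by omega
    have hne : h ≠ [] := by intro hc; rw [hc] at hl; simp at hl
    have hdlen : h.dropLast.length = h.length - 1 := by simp
    have hdpos : 0 < h.dropLast.length := by omega
    have hgetj : ∀ i, i < h.length - 1 → h.dropLast.getD i 0 = h.getD i 0 := by
      intro i hi
      rw [List.getD_eq_getElem _ _ (by omega), List.getD_eq_getElem _ _ (by omega),
        List.getElem_dropLast]
    have hlast : h.getD (h.length - 1) 0 = h.getLast hne := by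
      rw [List.getD_eq_getElem _ _ (by omega), List.getLast_eq_getElem]
    have hmsh : (↑h : Multiset Int) = ↑h.dropLast + {h.getD (h.length - 1) 0} := by
      conv_lhs => rw [← List.dropLast_append_getLast hne]
      rw [← Multiset.coe_add, hlast]
      rfl
    set g := h.dropLast.set 0 (h.getD (h.length - 1) 0) with hg
    have hglen : g.length = h.length - 1 := by rw [hg, List.length_set, hdlen]
    have hpre : pvAH g 0 0 := by
      intro j hj0 hjlen hjsub hjs hparj
      rw [hglen] at hjlen
      have hparlt := pvPar_lt hj0
      rw [hg, pvGetD_set_ne (fun hc => hparj hc.symm), pvGetD_set_ne (by omega : (0:Nat) ≠ j),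
        hgetj j hjlen, hgetj (pvPar j) (by omega)]
      exact hh j hj0 (by omega)
    obtain ⟨hms, hheap, _⟩ := pvSiftupMain (by omega : 0 < g.length) hpre
    have hpop : pvHeappop h = (h.dropLast.getD 0 0, pvSiftup g 0) := by
      unfold pvHeappop
      dsimp only
      rw [if_pos hdpos]
    rw [hpop]
    have hget0 : h.dropLast.getD 0 0 = h.getD 0 0 := hgetj 0 (by omega)
    refine ⟨hget0, ?_, ?_⟩
    · dsimp only
      rw [hms]
      have hset := pvMsSet (l := h.dropLast) (i := 0) hdpos (h.getD (h.length - 1) 0)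
      rw [← hg] at hset
      rw [hmsh, ← hset, hget0]
      rw [add_comm, Multiset.singleton_add]
    · intro j hj0 hjlen
      exact hheap j hj0 hjlen (pvSub_zero j) (by omega)

theorem pvHeappushMain {h : List Int} (hh : pvIsHeap h) (item : Int) :
    (↑(pvHeappush h item) : Multiset Int) = item ::ₘ ↑h ∧ pvIsHeap (pvHeappush h item) := by
  have hni : (h ++ [item]).getD h.length 0 = item := by
    rw [List.getD_eq_getElem _ _ (by simp), List.getElem_concat_length]
    rfl
  have hpush : pvHeappush h item =
      ((pvSdLoop h.length (h ++ [item]) 0 h.length item).1.set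
        (pvSdLoop h.length (h ++ [item]) 0 h.length item).2 item) := by
    unfold pvHeappush pvSiftdown
    dsimp only
    rw [hni]
  have hglen : (h ++ [item]).length = h.length + 1 := by simp
  have hsd := pvSdMain 0 item h.length (h ++ [item]) h.length le_rfl (Nat.zero_le _)
    (pvSub_zero _) (by rw [hglen]; omega)
    (by
      intro j hj0 hjlen hjsub hjs hjpos hparpos
      rw [hglen] at hjlen
      have hjlt : j < h.length := by omega
      have hparlt : pvPar j < h.length := by have := pvPar_lt hj0; omega
      rw [List.getD_append _ _ _ _ hjlt, List.getD_append _ _ _ _ hparlt]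
      exact hh j hj0 hjlt)
    (by
      intro j hj0 hjlen hparj
      rw [hglen] at hjlen
      have := pvPar_child_gt hj0 hparj
      omega)
    (by
      intro _ j hj0 hjlen hparj
      rw [hglen] at hjlen
      have := pvPar_child_gt hj0 hparj
      omega)
  have hms := pvSdMs 0 item h.length (h ++ [item]) h.length le_rfl (by rw [hglen]; omega)
  have hsetid := pvSetGetDSelf (l := h ++ [item]) (i := h.length) (by simp)
  rw [hni] at hsetid
  constructor
  · rw [hpush, hms, hsetid]
    simp only [← Multiset.coe_add]
    rw [add_comm]
    simp [← Multiset.cons_coe]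
  · intro j hj0 hjlen
    rw [hpush] at hjlen ⊢
    simp only [List.length_set, pvSdLoop_len, hglen] at hjlen
    exact hsd.1 j hj0 (by omega) (pvSub_zero j) (by omega)

-- ===== generic sorted-list facts =====
theorem pvMemGetD {l : List Int} {x : Int} (h : x ∈ l) : ∃ i, i < l.length ∧ l.getD i 0 = x := by
  obtain ⟨i, hi, he⟩ := List.mem_iff_getElem.mp h
  exact ⟨i, hi, by rw [List.getD_eq_getElem _ _ hi, he]⟩

theorem pvGetDMem {l : List Int} (h : l ≠ []) : l.getD 0 0 ∈ l := by
  cases l with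
  | nil => exact absurd rfl h
  | cons a t => simp [List.getD_cons_zero]

-- head of a sorted cons-list is below each member
theorem pvSortedHeadLe {p : Int} {t : List Int} (h : (p :: t).Pairwise (· ≤ ·)) :
    ∀ x ∈ p :: t, p ≤ x := by
  intro x hx
  rcases List.mem_cons.mp hx with rfl | hx
  · exact le_refl x
  · exact List.rel_of_pairwise_cons h hx

theorem pvHeadEq {h pool : List Int} (hh : pvIsHeap h) (hs : pool.Pairwise (· ≤ ·))
    (hm : (↑h : Multiset Int) = ↑pool) (hne : pool ≠ []) :
    h.getD 0 0 = pool.getD 0 0 := by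
  obtain ⟨p0, t, rfl⟩ : ∃ p0 t, pool = p0 :: t := by
    cases pool with
    | nil => exact absurd rfl hne
    | cons a t => exact ⟨a, t, rfl⟩
  have hlen : h.length = (p0 :: t).length := by simpa using congrArg Multiset.card hm
  have hne' : h ≠ [] := by
    intro hc; rw [hc] at hlen; simp at hlen
  have h0mem : h.getD 0 0 ∈ p0 :: t := by
    have h1 : h.getD 0 0 ∈ h := pvGetDMem hne'
    have h2 : h.getD 0 0 ∈ (↑(p0 :: t) : Multiset Int) := by
      rw [← hm]; exact Multiset.mem_coe.mpr h1
    exact Multiset.mem_coe.mp h2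
  have hp0le : p0 ≤ h.getD 0 0 := by
    rcases List.mem_cons.mp h0mem with he | hmem
    · omega
    · exact List.rel_of_pairwise_cons hs hmem
  have hle : h.getD 0 0 ≤ p0 := by
    have hp0 : p0 ∈ h := by
      have : p0 ∈ (↑h : Multiset Int) := by
        rw [hm]; exact Multiset.mem_coe.mpr (List.mem_cons_self ..)
      exact Multiset.mem_coe.mp this
    obtain ⟨i, hi, he⟩ := pvMemGetD hp0
    rw [← he]
    exact pvRootMin hh i hi
  rw [List.getD_cons_zero]
  omega

-- min(xs) on a heap is its root
theorem pvMinEq {l : List Int} (hh : pvIsHeap l) (hne : l ≠ []) :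
    (PySem.List.min? l (fun x => x)).getD 0 = l.getD 0 0 := by
  cases hmin : PySem.List.min? l (fun x => x) with
  | none => exact absurd ((PySem.List.min?_eq_none_iff l (fun x => x)).mp hmin) hne
  | some m =>
    have hmem := PySem.List.min?_mem hmin
    have hisMin := PySem.List.min?_isMin hmin
    simp only [Option.getD_some]
    obtain ⟨i, hi, he⟩ := pvMemGetD hmem
    have h1 : m ≤ l.getD 0 0 := hisMin _ (pvGetDMem hne)
    have h2 : l.getD 0 0 ≤ m := by rw [← he]; exact pvRootMin hh i hi
    omega

-- ===== the heap loop computes the sorted-pool loop =====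
theorem pvLoopEqPool (fuel : Nat) : ∀ (h pool : List Int) (K cnt : Int), h.length ≤ fuel →
    pvIsHeap h → pool.Pairwise (· ≤ ·) → (↑h : Multiset Int) = ↑pool → pool ≠ [] →
    (pvLoopA fuel h K cnt).2 = (pvPoolLoop fuel pool K cnt).2 ∧
    (↑(pvLoopA fuel h K cnt).1 : Multiset Int) = ↑(pvPoolLoop fuel pool K cnt).1 ∧
    pvIsHeap (pvLoopA fuel h K cnt).1 ∧ (pvPoolLoop fuel pool K cnt).1.Pairwise (· ≤ ·) ∧
    (pvPoolLoop fuel pool K cnt).1 ≠ [] := by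
  induction fuel with
  | zero =>
    intro h pool K cnt hfuel hh hsort hm hne
    exact ⟨rfl, hm, hh, hsort, hne⟩
  | succ fuel ih =>
    intro h pool K cnt hfuel hh hsort hm hne
    have hcard : h.length = pool.length := by simpa using congrArg Multiset.card hm
    have hhead : h.getD 0 0 = pool.getD 0 0 := pvHeadEq hh hsort hm hne
    rw [pvLoopA, pvPoolLoop]
    by_cases hguard : pool.getD 0 0 < K ∧ 1 < pool.length
    · rw [if_pos (show h.getD 0 0 < K ∧ 1 < h.length by rw [hhead, hcard]; exact hguard),
        if_pos hguard]
      dsimp only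
      obtain ⟨p0, t, rfl⟩ : ∃ p0 t, pool = p0 :: t := by
        cases pool with
        | nil => exact absurd rfl hne
        | cons a t => exact ⟨a, t, rfl⟩
      have htne : t ≠ [] := by
        intro hc; rw [hc] at hguard; simp at hguard
      obtain ⟨t0, t', rfl⟩ : ∃ t0 t', t = t0 :: t' := by
        cases t with
        | nil => exact absurd rfl htne
        | cons a t' => exact ⟨a, t', rfl⟩
      -- first pop
      obtain ⟨hv1, hms1, hheap1⟩ := pvHeappopMain hh (by omega)
      have hmcons : (↑h : Multiset Int) = p0 ::ₘ ↑(t0 :: t') := by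
        rw [hm, Multiset.cons_coe]
      have hv1' : (pvHeappop h).1 = p0 := by rw [hv1, hhead, List.getD_cons_zero]
      have hms1' : (↑(pvHeappop h).2 : Multiset Int) = ↑(t0 :: t') := by
        have := hms1
        rw [hmcons, hv1'] at this
        exact (Multiset.cons_inj_right p0).mp this.symm
      have hlen1 : (pvHeappop h).2.length = h.length - 1 := pvHeappop_len h
      have htsort : (t0 :: t').Pairwise (· ≤ ·) := (List.pairwise_cons.mp hsort).2
      -- second pop
      obtain ⟨hv2, hms2, hheap2⟩ := pvHeappopMain hheap1 (by
        rw [hlen1, hcard]; simp)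
      have hhead2 : (pvHeappop h).2.getD 0 0 = t0 := by
        rw [pvHeadEq hheap1 htsort hms1' (by simp), List.getD_cons_zero]
      have hv2' : (pvHeappop (pvHeappop h).2).1 = t0 := by rw [hv2, hhead2]
      have hms2' : (↑(pvHeappop (pvHeappop h).2).2 : Multiset Int) = ↑t' := by
        have := hms2
        rw [hms1', hv2', ← Multiset.cons_coe] at this
        exact (Multiset.cons_inj_right t0).mp this.symm
      -- the mixed value is the same on both sides
      have hvv : (pvHeappop h).1 + (pvHeappop (pvHeappop h).2).1 * 2 =
          (p0 :: t0 :: t').getD 0 0 + (p0 :: t0 :: t').getD 1 0 * 2 := by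
        rw [hv1', hv2']; rfl
      -- push on the A side
      obtain ⟨hmsp, hheapp⟩ := pvHeappushMain hheap2
        ((p0 :: t0 :: t').getD 0 0 + (p0 :: t0 :: t').getD 1 0 * 2)
      rw [hvv]
      -- the pool side: ordered insertion into t'
      have hdrop : (p0 :: t0 :: t').drop 2 = t' := rfl
      rw [hdrop]
      have htsort' : t'.Pairwise (· ≤ ·) := (List.pairwise_cons.mp htsort).2
      set v := (p0 :: t0 :: t').getD 0 0 + (p0 :: t0 :: t').getD 1 0 * 2 with hvdef
      have hinssort : (List.orderedInsert (· ≤ ·) v t').Pairwise (· ≤ ·) :=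
        List.Pairwise.orderedInsert v t' htsort'
      have hinsms : (↑(List.orderedInsert (· ≤ ·) v t') : Multiset Int) = v ::ₘ ↑t' := by
        have := List.perm_orderedInsert (· ≤ ·) v t'
        rw [Multiset.coe_eq_coe.mpr this, Multiset.cons_coe]
      have hlen3 : (pvHeappush (pvHeappop (pvHeappop h).2).2 v).length = h.length - 1 := by
        rw [pvHeappush_len, pvHeappop_len, pvHeappop_len]
        rw [hcard]
        simp
      have hmsfin : (↑(pvHeappush (pvHeappop (pvHeappop h).2).2 v) : Multiset Int) =
          ↑(List.orderedInsert (· ≤ ·) v t') := by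
        rw [hmsp, hms2', hinsms]
      have hinsne : List.orderedInsert (· ≤ ·) v t' ≠ [] := by
        apply List.ne_nil_of_length_pos
        rw [List.orderedInsert_length]
        omega
      exact ih _ _ K (cnt + 1) (by rw [hlen3]; omega) hheapp hinssort hmsfin hinsne
    · rw [if_neg (show ¬ (h.getD 0 0 < K ∧ 1 < h.length) by rw [hhead, hcard]; exact hguard),
        if_neg hguard]
      exact ⟨rfl, hm, hh, hsort, hne⟩

-- ===== the two-queue pops take the head of the sorted pool =====
theorem pvPopT {xs : List Int} {i : Nat} {merged : List Int} {j : Nat} {p : Int} {t : List Int}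
    (hX : (xs.drop i).Pairwise (· ≤ ·)) (hM : (merged.drop j).Pairwise (· ≤ ·))
    (hpool : (p :: t).Pairwise (· ≤ ·))
    (hm : (↑(p :: t) : Multiset Int) = ↑(xs.drop i) + ↑(merged.drop j))
    (hc : i < xs.length ∧ (merged.length ≤ j ∨ xs.getD i 0 ≤ merged.getD j 0)) :
    xs.getD i 0 = p ∧ (↑t : Multiset Int) = ↑(xs.drop (i + 1)) + ↑(merged.drop j) := by
  obtain ⟨hilt, hsel⟩ := hc
  have hXd : xs.drop i = xs.getD i 0 :: xs.drop (i + 1) := by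
    rw [List.getD_eq_getElem _ _ hilt]
    exact List.drop_eq_getElem_cons hilt
  have hsle : ∀ x, x ∈ xs.drop i ∨ x ∈ merged.drop j → xs.getD i 0 ≤ x := by
    intro x hx
    rcases hx with hx | hx
    · exact pvSortedHeadLe (hXd ▸ hX) x (hXd ▸ hx)
    · rcases hsel with hje | hle
      · rw [List.drop_eq_nil_of_le hje] at hx; cases hx
      · have hjlt : j < merged.length := by
          by_contra hh
          push_neg at hh
          rw [List.drop_eq_nil_of_le hh] at hx
          cases hx
        have hMd : merged.drop j = merged.getD j 0 :: merged.drop (j + 1) := by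
          rw [List.getD_eq_getElem _ _ hjlt]
          exact List.drop_eq_getElem_cons hjlt
        exact le_trans hle (pvSortedHeadLe (hMd ▸ hM) x (hMd ▸ hx))
  have hpmem : p ∈ xs.drop i ∨ p ∈ merged.drop j := by
    have h1 : p ∈ (↑(p :: t) : Multiset Int) := by simp
    rw [hm] at h1
    rcases Multiset.mem_add.mp h1 with h2 | h2
    · exact Or.inl (Multiset.mem_coe.mp h2)
    · exact Or.inr (Multiset.mem_coe.mp h2)
  have hps : p ≤ xs.getD i 0 := by
    have hsmem : xs.getD i 0 ∈ (p :: t) := by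
      have h1 : xs.getD i 0 ∈ (↑(p :: t) : Multiset Int) := by
        rw [hm]
        exact Multiset.mem_add.mpr (Or.inl (Multiset.mem_coe.mpr (hXd ▸ List.mem_cons_self ..)))
      exact Multiset.mem_coe.mp h1
    exact pvSortedHeadLe hpool _ hsmem
  have hsp : xs.getD i 0 ≤ p := hsle p hpmem
  have heq : xs.getD i 0 = p := le_antisymm hsp hps
  refine ⟨heq, (Multiset.cons_inj_right p).mp ?_⟩
  calc (p ::ₘ (↑t : Multiset Int)) = ↑(p :: t) := Multiset.cons_coe p t
    _ = ↑(xs.getD i 0 :: xs.drop (i + 1)) + ↑(merged.drop j) := by rw [hm, hXd]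
    _ = p ::ₘ (↑(xs.drop (i + 1)) + ↑(merged.drop j)) := by
        rw [← Multiset.cons_coe, heq, Multiset.cons_add]

theorem pvPopF {xs : List Int} {i : Nat} {merged : List Int} {j : Nat} {p : Int} {t : List Int}
    (hX : (xs.drop i).Pairwise (· ≤ ·)) (hM : (merged.drop j).Pairwise (· ≤ ·))
    (hpool : (p :: t).Pairwise (· ≤ ·))
    (hm : (↑(p :: t) : Multiset Int) = ↑(xs.drop i) + ↑(merged.drop j))
    (hc : ¬ (i < xs.length ∧ (merged.length ≤ j ∨ xs.getD i 0 ≤ merged.getD j 0))) :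
    merged.getD j 0 = p ∧ j < merged.length ∧
    (↑t : Multiset Int) = ↑(xs.drop i) + ↑(merged.drop (j + 1)) := by
  have hpmem : p ∈ xs.drop i ∨ p ∈ merged.drop j := by
    have h1 : p ∈ (↑(p :: t) : Multiset Int) := by simp
    rw [hm] at h1
    rcases Multiset.mem_add.mp h1 with h2 | h2
    · exact Or.inl (Multiset.mem_coe.mp h2)
    · exact Or.inr (Multiset.mem_coe.mp h2)
  have hjlt : j < merged.length := by
    by_contra hh
    push_neg at hh
    by_cases hi : i < xs.length
    · exact hc ⟨hi, Or.inl hh⟩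
    · push_neg at hi
      rcases hpmem with h2 | h2
      · rw [List.drop_eq_nil_of_le hi] at h2; cases h2
      · rw [List.drop_eq_nil_of_le hh] at h2; cases h2
  have hMd : merged.drop j = merged.getD j 0 :: merged.drop (j + 1) := by
    rw [List.getD_eq_getElem _ _ hjlt]
    exact List.drop_eq_getElem_cons hjlt
  have hsle : ∀ x, x ∈ xs.drop i ∨ x ∈ merged.drop j → merged.getD j 0 ≤ x := by
    intro x hx
    rcases hx with hx | hx
    · -- x on the xs side: if xs is exhausted this is vacuous, else merged[j] < xs[i] ≤ x
      by_cases hi : i < xs.length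
      · have hxm : merged.getD j 0 < xs.getD i 0 := by
          by_contra hh
          push_neg at hh
          exact hc ⟨hi, Or.inr hh⟩
        have hXd : xs.drop i = xs.getD i 0 :: xs.drop (i + 1) := by
          rw [List.getD_eq_getElem _ _ hi]
          exact List.drop_eq_getElem_cons hi
        exact le_trans (le_of_lt hxm) (pvSortedHeadLe (hXd ▸ hX) x (hXd ▸ hx))
      · push_neg at hi
        rw [List.drop_eq_nil_of_le hi] at hx
        cases hx
    · exact pvSortedHeadLe (hMd ▸ hM) x (hMd ▸ hx)
  have hps : p ≤ merged.getD j 0 := by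
    have hsmem : merged.getD j 0 ∈ (p :: t) := by
      have h1 : merged.getD j 0 ∈ (↑(p :: t) : Multiset Int) := by
        rw [hm]
        exact Multiset.mem_add.mpr (Or.inr (Multiset.mem_coe.mpr (hMd ▸ List.mem_cons_self ..)))
      exact Multiset.mem_coe.mp h1
    exact pvSortedHeadLe hpool _ hsmem
  have hsp : merged.getD j 0 ≤ p := hsle p hpmem
  have heq : merged.getD j 0 = p := le_antisymm hsp hps
  refine ⟨heq, hjlt, (Multiset.cons_inj_right p).mp ?_⟩
  calc (p ::ₘ (↑t : Multiset Int)) = ↑(p :: t) := Multiset.cons_coe p t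
    _ = ↑(xs.drop i) + ↑(merged.getD j 0 :: merged.drop (j + 1)) := by rw [hm, hMd]
    _ = p ::ₘ (↑(xs.drop i) + ↑(merged.drop (j + 1))) := by
        rw [← Multiset.cons_coe, heq, ← Multiset.singleton_add, ← Multiset.singleton_add]
        abel

-- appended merged values dominate every surviving queued value, and the queue invariant
-- is re-established on the new pool
theorem pvInvStep {p0 p1 v : Int} {t' : List Int}
    (h01 : p0 ≤ p1) (h1t : ∀ x ∈ t', p1 ≤ x) (hv : v = p0 + p1 * 2) :
    ∀ w : Int, w ≤ v →
      w ≤ (List.orderedInsert (· ≤ ·) v t').getD 0 0 +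
          (List.orderedInsert (· ≤ ·) v t').getD 1 0 * 2 ∨
      w < (List.orderedInsert (· ≤ ·) v t').getD 1 0 := by
  intro w hw
  cases t' with
  | nil =>
    simp only [List.orderedInsert_nil]
    have h0 : ([v] : List Int).getD 0 0 = v := rfl
    have h1 : ([v] : List Int).getD 1 0 = 0 := rfl
    rw [h0, h1]
    omega
  | cons r0 rest =>
    have hp1r0 : p1 ≤ r0 := h1t r0 (List.mem_cons_self ..)
    rw [List.orderedInsert_cons]
    by_cases hvr0 : v ≤ r0
    · rw [if_pos hvr0]
      have h0 : (v :: r0 :: rest).getD 0 0 = v := rfl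
      have h1 : (v :: r0 :: rest).getD 1 0 = r0 := rfl
      rw [h0, h1]
      omega
    · rw [if_neg hvr0]
      cases rest with
      | nil =>
        simp only [List.orderedInsert_nil]
        have h0 : (r0 :: [v]).getD 0 0 = r0 := rfl
        have h1 : (r0 :: [v]).getD 1 0 = v := rfl
        rw [h0, h1]
        omega
      | cons r1 rest' =>
        have hp1r1 : p1 ≤ r1 := h1t r1 (List.mem_cons_of_mem _ (List.mem_cons_self ..))
        rw [List.orderedInsert_cons]
        by_cases hvr1 : v ≤ r1
        · rw [if_pos hvr1]
          have h0 : (r0 :: v :: r1 :: rest').getD 0 0 = r0 := rfl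
          have h1 : (r0 :: v :: r1 :: rest').getD 1 0 = v := rfl
          rw [h0, h1]
          omega
        · rw [if_neg hvr1]
          have h0 : (r0 :: r1 :: List.orderedInsert (· ≤ ·) v rest').getD 0 0 = r0 := rfl
          have h1 : (r0 :: r1 :: List.orderedInsert (· ≤ ·) v rest').getD 1 0 = r1 := rfl
          rw [h0, h1]
          omega

-- ===== the two-queue loop computes the sorted-pool loop =====
theorem pvQEq (fuel : Nat) : ∀ (xs : List Int) (i : Nat) (merged : List Int) (j : Nat)
    (pool : List Int) (K cnt : Int),
    pool.length ≤ fuel →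
    i ≤ xs.length → j ≤ merged.length →
    (xs.drop i).Pairwise (· ≤ ·) → (merged.drop j).Pairwise (· ≤ ·) →
    pool.Pairwise (· ≤ ·) →
    (↑pool : Multiset Int) = ↑(xs.drop i) + ↑(merged.drop j) →
    pool ≠ [] →
    (2 ≤ pool.length → ∀ w ∈ merged.drop j,
      w ≤ pool.getD 0 0 + pool.getD 1 0 * 2 ∨ w < pool.getD 1 0) →
    pvQLoop fuel xs i merged j K cnt =
      ((pvPoolLoop fuel pool K cnt).1.getD 0 0, (pvPoolLoop fuel pool K cnt).2) := by
  induction fuel with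
  | zero =>
    intro xs i merged j pool K cnt hfuel _ _ _ _ _ hm hne _
    exact absurd (List.eq_nil_of_length_eq_zero (by omega)) hne
  | succ fuel ih =>
    intro xs i merged j pool K cnt hfuel hi hj hX hM hpool hm hne hinv
    obtain ⟨p0, t, rfl⟩ : ∃ p0 t, pool = p0 :: t := by
      cases pool with
      | nil => exact absurd rfl hne
      | cons a t => exact ⟨a, t, rfl⟩
    have hcard : (p0 :: t).length = (xs.drop i).length + (merged.drop j).length := by
      have := congrArg Multiset.card hm
      simpa using this
    have hrem : (xs.length - i) + (merged.length - j) = (p0 :: t).length := by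
      rw [hcard, List.length_drop, List.length_drop]
    simp only [pvQLoop, pvPoolLoop]
    -- the common closing step once both pops are identified with the pool's two heads:
    -- append the mixed value and recurse through the induction hypothesis
    have finish : ∀ (i2 j2 : Nat) (p1 : Int) (t' : List Int),
        t = p1 :: t' →
        i2 ≤ xs.length → j ≤ j2 → j2 ≤ merged.length →
        (xs.drop i2).Pairwise (· ≤ ·) →
        (↑t' : Multiset Int) = ↑(xs.drop i2) + ↑(merged.drop j2) →
        pvQLoop fuel xs i2 (merged ++ [p0 + p1 * 2]) j2 K (cnt + 1) =
          ((pvPoolLoop fuel (List.orderedInsert (· ≤ ·) (p0 + p1 * 2) t') K (cnt + 1)).1.getD 0 0,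
           (pvPoolLoop fuel (List.orderedInsert (· ≤ ·) (p0 + p1 * 2) t') K (cnt + 1)).2) := by
      intro i2 j2 p1 t' htt hi2 hjj hj2 hX2 hms2
      subst htt
      have hpool1 : (p1 :: t').Pairwise (· ≤ ·) := (List.pairwise_cons.mp hpool).2
      have h01 : p0 ≤ p1 := (List.pairwise_cons.mp hpool).1 p1 (List.mem_cons_self ..)
      have h1t : ∀ x ∈ t', p1 ≤ x := (List.pairwise_cons.mp hpool1).1
      have ht'sort : t'.Pairwise (· ≤ ·) := (List.pairwise_cons.mp hpool1).2
      set v := p0 + p1 * 2 with hvdef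
      have hdropM : merged.drop j2 = (merged.drop j).drop (j2 - j) := by
        rw [List.drop_drop]
        congr 1
        omega
      have hsubM : ∀ a, a ∈ merged.drop j2 → a ∈ merged.drop j := by
        intro a ha
        rw [hdropM] at ha
        exact (List.drop_sublist _ _).subset ha
      have hM2 : (merged.drop j2).Pairwise (· ≤ ·) := by
        rw [hdropM]
        exact hM.sublist (List.drop_sublist _ _)
      -- every surviving queued value is at most the new mixed value
      have hale : ∀ a, a ∈ merged.drop j2 → a ≤ v := by
        intro a ha
        have hat' : a ∈ t' := by
          have h1 : a ∈ (↑t' : Multiset Int) := by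
            rw [hms2]
            exact Multiset.mem_add.mpr (Or.inr (Multiset.mem_coe.mpr ha))
          exact Multiset.mem_coe.mp h1
        have hge : p1 ≤ a := h1t a hat'
        have hd := hinv (by simp) a (hsubM a ha)
        simp only [List.getD_cons_zero, List.getD_cons_succ] at hd
        rcases hd with h1 | h1
        · exact h1
        · omega
      have hMd : (merged ++ [v]).drop j2 = merged.drop j2 ++ [v] :=
        List.drop_append_of_le_length hj2
      have hM'' : (((merged ++ [v]).drop j2)).Pairwise (· ≤ ·) := by
        rw [hMd, List.pairwise_append]
        refine ⟨hM2, List.pairwise_singleton _ _, ?_⟩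
        intro a ha b hb
        rcases List.mem_singleton.mp hb with rfl
        exact hale a ha
      have hoisort : (List.orderedInsert (· ≤ ·) v t').Pairwise (· ≤ ·) :=
        List.Pairwise.orderedInsert v t' ht'sort
      have hoilen : (List.orderedInsert (· ≤ ·) v t').length = t'.length + 1 :=
        List.orderedInsert_length ..
      have hoine : List.orderedInsert (· ≤ ·) v t' ≠ [] :=
        List.ne_nil_of_length_pos (by omega)
      have hoims : (↑(List.orderedInsert (· ≤ ·) v t') : Multiset Int) = v ::ₘ ↑t' := by
        rw [Multiset.coe_eq_coe.mpr (List.perm_orderedInsert (· ≤ ·) v t'), Multiset.cons_coe]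
      have hmsapp : (↑(merged.drop j2 ++ [v]) : Multiset Int) = ↑(merged.drop j2) + {v} := by
        rw [← Multiset.coe_add]
        rfl
      have hmnew : (↑(List.orderedInsert (· ≤ ·) v t') : Multiset Int) =
          ↑(xs.drop i2) + ↑((merged ++ [v]).drop j2) := by
        rw [hoims, hMd, hmsapp, hms2, ← Multiset.singleton_add]
        abel
      have hinvnew : 2 ≤ (List.orderedInsert (· ≤ ·) v t').length →
          ∀ w ∈ (merged ++ [v]).drop j2,
            w ≤ (List.orderedInsert (· ≤ ·) v t').getD 0 0 +
                (List.orderedInsert (· ≤ ·) v t').getD 1 0 * 2 ∨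
            w < (List.orderedInsert (· ≤ ·) v t').getD 1 0 := by
        intro _ w hw
        rw [hMd] at hw
        have hwv : w ≤ v := by
          rcases List.mem_append.mp hw with h1 | h1
          · exact hale w h1
          · exact le_of_eq (List.mem_singleton.mp h1)
        exact pvInvStep h01 h1t hvdef w hwv
      have hflen : (p0 :: p1 :: t').length ≤ fuel + 1 := hfuel
      exact ih xs i2 (merged ++ [v]) j2 (List.orderedInsert (· ≤ ·) v t') K (cnt + 1)
        (by rw [hoilen]; simp at hflen; omega)
        hi2 (by simp; omega) hX2 hM'' hoisort hmnew hoine hinvnew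
    have hdd1 : ∀ n : Nat, (xs.drop n).drop 1 = xs.drop (n + 1) := fun n => List.drop_drop ..
    have hddM : ∀ n : Nat, (merged.drop n).drop 1 = merged.drop (n + 1) := fun n =>
      List.drop_drop ..
    by_cases hc1 : i < xs.length ∧ (merged.length ≤ j ∨ xs.getD i 0 ≤ merged.getD j 0)
    · obtain ⟨hf1, hms1⟩ := pvPopT hX hM hpool hm hc1
      have hX1 : (xs.drop (i + 1)).Pairwise (· ≤ ·) := by
        rw [← hdd1 i]
        exact hX.sublist (List.drop_sublist _ _)
      rw [if_pos hc1, if_pos hc1]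
      by_cases hguard : (p0 :: t).getD 0 0 < K ∧ 1 < (p0 :: t).length
      · have hgport : xs.getD i 0 < K ∧ 1 < xs.length - i + (merged.length - j) := by
          constructor
          · rw [hf1]; exact hguard.1
          · rw [hrem]; exact hguard.2
        rw [if_pos hgport, if_pos hguard]
        obtain ⟨p1, t', rfl⟩ : ∃ p1 t', t = p1 :: t' := by
          cases t with
          | nil => exfalso; simp at hguard
          | cons a t' => exact ⟨a, t', rfl⟩
        have hpool1 : (p1 :: t').Pairwise (· ≤ ·) := (List.pairwise_cons.mp hpool).2
        by_cases hc2 : i + 1 < xs.length ∧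
            (merged.length ≤ j ∨ xs.getD (i + 1) 0 ≤ merged.getD j 0)
        · obtain ⟨hf2, hms2⟩ := pvPopT hX1 hM hpool1 hms1 hc2
          rw [if_pos hc2, hf1, hf2]
          have e2 : i + 1 + 1 = i + 2 := by omega
          rw [e2] at hms2
          have hX2 : (xs.drop (i + 2)).Pairwise (· ≤ ·) := by
            rw [← e2, ← hdd1 (i + 1)]
            exact hX1.sublist (List.drop_sublist _ _)
          exact finish (i + 2) j p1 t' rfl (by omega) le_rfl hj hX2 hms2
        · obtain ⟨hf2, hjlt2, hms2⟩ := pvPopF hX1 hM hpool1 hms1 hc2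
          rw [if_neg hc2, hf1, hf2]
          exact finish (i + 1) (j + 1) p1 t' rfl (by omega) (by omega) (by omega) hX1 hms2
      · have hgport : ¬ (xs.getD i 0 < K ∧ 1 < xs.length - i + (merged.length - j)) := by
          rw [hf1, hrem]; exact hguard
        rw [if_neg hgport, if_neg hguard, hf1]
        rfl
    · obtain ⟨hf1, hjlt1, hms1⟩ := pvPopF hX hM hpool hm hc1
      have hM1 : (merged.drop (j + 1)).Pairwise (· ≤ ·) := by
        rw [← hddM j]
        exact hM.sublist (List.drop_sublist _ _)
      rw [if_neg hc1, if_neg hc1]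
      by_cases hguard : (p0 :: t).getD 0 0 < K ∧ 1 < (p0 :: t).length
      · have hgport : merged.getD j 0 < K ∧ 1 < xs.length - i + (merged.length - j) := by
          constructor
          · rw [hf1]; exact hguard.1
          · rw [hrem]; exact hguard.2
        rw [if_pos hgport, if_pos hguard]
        obtain ⟨p1, t', rfl⟩ : ∃ p1 t', t = p1 :: t' := by
          cases t with
          | nil => exfalso; simp at hguard
          | cons a t' => exact ⟨a, t', rfl⟩
        have hpool1 : (p1 :: t').Pairwise (· ≤ ·) := (List.pairwise_cons.mp hpool).2
        by_cases hc2 : i < xs.length ∧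
            (merged.length ≤ j + 1 ∨ xs.getD i 0 ≤ merged.getD (j + 1) 0)
        · obtain ⟨hf2, hms2⟩ := pvPopT hX hM1 hpool1 hms1 hc2
          rw [if_pos hc2, hf1, hf2]
          have hX1 : (xs.drop (i + 1)).Pairwise (· ≤ ·) := by
            rw [← hdd1 i]
            exact hX.sublist (List.drop_sublist _ _)
          exact finish (i + 1) (j + 1) p1 t' rfl (by omega) (by omega) (by omega) hX1 hms2
        · obtain ⟨hf2, hjlt2, hms2⟩ := pvPopF hX hM1 hpool1 hms1 hc2
          rw [if_neg hc2, hf1, hf2]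
          have e2 : j + 1 + 1 = j + 2 := by omega
          rw [e2] at hms2
          exact finish i (j + 2) p1 t' rfl (by omega) (by omega) (by omega) hX hms2
      · have hgport : ¬ (merged.getD j 0 < K ∧ 1 < xs.length - i + (merged.length - j)) := by
          rw [hf1, hrem]; exact hguard
        rw [if_neg hgport, if_neg hguard, hf1]
        rfl

-- ===== VERDICT (by name: the statement is the Claim_ definition above) =====
theorem solution_spec : Claim_equal_solution := by
  unfold Claim_equal_solution
  intro scoville K _ hpre
  unfold Spec_solution solution solution_alt
  dsimp only
  obtain ⟨hmsH, hheapH⟩ := pvHeapifyMain scoville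
  have hpoolperm := PySem.List.sorted_perm scoville (fun x => x) false
  have hpoolms : (↑(pvHeapify scoville) : Multiset Int) =
      ↑(PySem.List.sorted scoville (fun x => x) false) := by
    rw [hmsH]
    exact (Multiset.coe_eq_coe.mpr hpoolperm).symm
  have hpoolsorted : (PySem.List.sorted scoville (fun x => x) false).Pairwise (· ≤ ·) :=
    PySem.List.sorted_pairwise scoville (fun x => x)
  have hpoolne : PySem.List.sorted scoville (fun x => x) false ≠ [] := by
    rw [Ne, PySem.List.sorted_eq_nil_iff]
    exact hpre
  have hfeq : (PySem.List.sorted scoville (fun x => x) false).length =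
      (pvHeapify scoville).length := by
    simpa using (congrArg Multiset.card hpoolms).symm
  rw [hfeq]
  obtain ⟨hcnt, hms, hheapF, hsortF, hneF⟩ := pvLoopEqPool (pvHeapify scoville).length
    (pvHeapify scoville) (PySem.List.sorted scoville (fun x => x) false) K 0 le_rfl
    hheapH hpoolsorted hpoolms hpoolne
  have hq := pvQEq (pvHeapify scoville).length
    (PySem.List.sorted scoville (fun x => x) false) 0 [] 0
    (PySem.List.sorted scoville (fun x => x) false) K 0
    (le_of_eq hfeq) (Nat.zero_le _) le_rfl
    (by simpa using hpoolsorted) (by simp)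
    hpoolsorted (by simp) hpoolne (by simp)
  rw [hq]
  have hraneq : (pvLoopA (pvHeapify scoville).length (pvHeapify scoville) K 0).1 ≠ [] := by
    intro hc
    rw [hc] at hms
    have := congrArg Multiset.card hms
    simp at this
    exact hneF (List.eq_nil_of_length_eq_zero this.symm)
  rw [pvMinEq hheapF hraneq,
    pvHeadEq hheapF hsortF hms hneF, hcnt]
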